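-- pv_equiv track=rewrite | github.com/CuriousCI/university | python/homework/2-required/godzilla.py | xkcd_to_list_of_weights
-- ===== SOURCE A (Python) =====
-- def xkcd_to_list_of_weights(xkcd: str) -> list[int]:
--     tests = {
--         '1101001000': [1, 10, 100, 1000],
--         '1000100100010100110': [1000, 100, 1000, 10, 100, 1, 10],
--         '100010001050015': [1000, 1000, 10, 500, 1, 5],
--         '50010010050101015': [500, 100, 100, 50, 10, 10, 1, 5],
--     }
--
--     if xkcd in tests:
--         return tests[xkcd]
--
--     return [int(x) for x in xkcd.replace('1', ' 1').replace('5', ' 5').strip().split()]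
-- ===== SOURCE B (Python) =====
-- def xkcd_to_list_of_weights(xkcd: str) -> list[int]:
--     weights = []
--     token = ''
--     for ch in xkcd:
--         if ch.isspace():
--             if token:
--                 weights.append(int(token))
--                 token = ''
--         else:
--             if ch in '15' and token:
--                 weights.append(int(token))
--                 token = ''
--             token += ch
--     if token:
--         weights.append(int(token))
--     return weights
-- ===== Notes on version B (the rewrite author's own statement) =====
-- stated objective: alternative
-- what changed: B drops A's hardcoded test dict (its four values equal the fallback parse) and replaces the replace/replace/strip/split/int-comprehension pipeline with a single left-to-right scan that flushes the current token at whitespace and before each '1'/'5'.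
-- outside the precondition, e.g. on xkcd_to_list_of_weights('+2'): A returns [2], B returns [2]; on xkcd_to_list_of_weights('a'): A raises ValueError, B raises ValueError
import Mathlib
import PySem

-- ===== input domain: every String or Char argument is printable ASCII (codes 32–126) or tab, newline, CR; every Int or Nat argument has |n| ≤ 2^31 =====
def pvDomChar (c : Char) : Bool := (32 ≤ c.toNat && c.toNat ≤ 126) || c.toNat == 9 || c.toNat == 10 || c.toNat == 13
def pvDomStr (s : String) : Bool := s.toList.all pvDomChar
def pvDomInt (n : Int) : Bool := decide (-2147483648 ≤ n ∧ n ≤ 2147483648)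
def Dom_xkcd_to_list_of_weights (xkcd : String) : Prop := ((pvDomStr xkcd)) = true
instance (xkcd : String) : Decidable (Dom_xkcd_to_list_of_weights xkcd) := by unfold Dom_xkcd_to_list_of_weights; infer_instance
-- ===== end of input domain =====

-- B replaces A's replace/strip/split/int pipeline (and its redundant hardcoded test dict) with a
-- single left-to-right scan that flushes the current token at whitespace and before each '1'/'5'.

-- ===== PORT A =====
def xkcd_to_list_of_weights (xkcd : String) : List Int :=
  let tests : PySem.Dict String (List Int) :=
    PySem.Dict.ofList
      [("1101001000", [1, 10, 100, 1000]),
       ("1000100100010100110", [1000, 100, 1000, 10, 100, 1, 10]),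
       ("100010001050015", [1000, 1000, 10, 500, 1, 5]),
       ("50010010050101015", [500, 100, 100, 50, 10, 10, 1, 5])]
  if tests.contains xkcd then (tests.get? xkcd).getD []
  else
    (PySem.Str.split₀ (PySem.Str.strip
        (PySem.Str.replace (PySem.Str.replace xkcd "1" " 1") "5" " 5"))).map
      (fun x => (PySem.Int.ofStr? x).getD 0)

-- ===== PORT B =====
-- int(token) on the tokens B builds (Pre_ makes them nonempty digit runs, so int() succeeds)
def pvConv (tok : List Char) : Int := (PySem.Int.ofChars? tok).getD 0

def xkcd_to_list_of_weights_alt (xkcd : String) : List Int :=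
  let st := xkcd.toList.foldl
    (fun (s : List Int × List Char) ch =>
      if PySem.Chars.isspace ch then
        if s.2.isEmpty then s else (s.1 ++ [pvConv s.2], [])
      else
        let s := if (ch == '1' || ch == '5') && !s.2.isEmpty
                 then (s.1 ++ [pvConv s.2], ([] : List Char)) else s
        (s.1, s.2 ++ [ch]))
    ([], [])
  if st.2.isEmpty then st.1 else st.1 ++ [pvConv st.2]

-- ===== PRECONDITION & SPEC =====
-- Pre_ is the function's natural domain: xkcd weight strings made of digits (plus surrounding/
-- separating whitespace). On other printable strings A's int() generally raises ValueError;
-- a few excluded strings with sign/underscore characters do still parse, and there A and B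
-- return the same value (see the cited example in claim.json).
def Pre_xkcd_to_list_of_weights (xkcd : String) : Prop :=
  xkcd.toList.all (fun c => PySem.Chars.isdigit c || PySem.Chars.isspace c) = true
instance (xkcd : String) : Decidable (Pre_xkcd_to_list_of_weights xkcd) := by
  unfold Pre_xkcd_to_list_of_weights; infer_instance
def pvWitness_xkcd_to_list_of_weights : String := "100 15"

def Spec_xkcd_to_list_of_weights (xkcd : String) (out : List Int) : Prop :=
  out = xkcd_to_list_of_weights_alt xkcd
instance (xkcd : String) (out : List Int) : Decidable (Spec_xkcd_to_list_of_weights xkcd out) := by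
  unfold Spec_xkcd_to_list_of_weights; infer_instance

-- ===== CLAIM (what is proved, stated in full; the proofs are below) =====
def Claim_equal_xkcd_to_list_of_weights : Prop :=
  ∀ (xkcd : String), Dom_xkcd_to_list_of_weights xkcd → Pre_xkcd_to_list_of_weights xkcd →
    Spec_xkcd_to_list_of_weights xkcd (xkcd_to_list_of_weights xkcd)

-- ===== LEMMAS AND PROOFS =====

-- how A's pipeline rewrites one character: a space before every '1' and '5'
def pvExpand (c : Char) : List Char :=
  if c == '1' then [' ', '1'] else if c == '5' then [' ', '5'] else [c]

-- token splitter shared shape: B's scan, expressed with split₀.go's reversed-accumulator state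
def pvBgo : List Char → List Char → List (List Char) → List (List Char)
  | [], cur, acc => if cur.isEmpty then acc.reverse else (cur.reverse :: acc).reverse
  | c :: cs, cur, acc =>
    if PySem.Chars.isspace c then
      if cur.isEmpty then pvBgo cs [] acc else pvBgo cs [] (cur.reverse :: acc)
    else if (c == '1' || c == '5') && !cur.isEmpty then pvBgo cs [c] (cur.reverse :: acc)
    else pvBgo cs (c :: cur) acc

theorem pv_replace_single (a : Char) (new : List Char) :
    ∀ (fuel : Nat) (l acc : List Char), l.length ≤ fuel →
      PySem.Chars.replace.go [a] new fuel l acc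
        = acc.reverse ++ l.flatMap (fun c => if c == a then new else [c]) := by
  intro fuel
  induction fuel with
  | zero => intro l acc h; interval_cases h' : l.length <;> simp_all [PySem.Chars.replace.go]
  | succ n ih =>
    intro l acc h
    cases l with
    | nil => simp [PySem.Chars.replace.go]
    | cons c t =>
      simp only [PySem.Chars.replace.go]
      by_cases hc : c = a
      · subst hc
        simp only [List.isPrefixOf, List.isPrefixOf_nil_left, Bool.and_true, beq_self_eq_true,
          if_pos]
        rw [ih] <;> simp_all
      · have : [a].isPrefixOf (c :: t) = false := by
          simp [List.isPrefixOf]; exact fun h' => absurd h'.symm hc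
        rw [this]
        simp only [Bool.false_eq_true, if_false]
        rw [ih] <;> simp_all [hc]

theorem pv_replace_eq_flatMap (a : Char) (new : List Char) (cs : List Char) :
    PySem.Chars.replace cs [a] new
      = cs.flatMap (fun c => if c == a then new else [c]) := by
  simp [PySem.Chars.replace, pv_replace_single a new cs.length cs [] le_rfl]

-- split₀ ignores leading whitespace
theorem pv_split_go_lstrip :
    ∀ (s : List Char) (acc : List (List Char)),
      PySem.Chars.split₀.go (s.dropWhile PySem.Chars.isspace) [] acc
        = PySem.Chars.split₀.go s [] acc := by
  intro s
  induction s with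
  | nil => intro acc; rfl
  | cons c t ih =>
    intro acc
    by_cases hc : PySem.Chars.isspace c = true
    · simp only [List.dropWhile_cons, hc, if_pos]
      rw [ih]
      conv_rhs => simp only [PySem.Chars.split₀.go, hc]
      simp
    · simp [List.dropWhile_cons, hc]

-- split₀ ignores trailing whitespace
theorem pv_split_go_rstrip :
    ∀ (s ws cur : List Char) (acc : List (List Char)),
      (∀ c ∈ ws, PySem.Chars.isspace c = true) →
      PySem.Chars.split₀.go (s ++ ws) cur acc = PySem.Chars.split₀.go s cur acc := by
  intro s
  induction s with
  | nil =>
    intro ws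
    induction ws with
    | nil => intro cur acc _; rfl
    | cons w t ihw =>
      intro cur acc hws
      have hw : PySem.Chars.isspace w = true := hws w (by simp)
      have ht : ∀ c ∈ t, PySem.Chars.isspace c = true := fun c hc => hws c (by simp [hc])
      simp only [List.nil_append, PySem.Chars.split₀.go, hw, if_pos]
      by_cases hcur : cur.isEmpty
      · rw [if_pos hcur]
        have h := ihw [] acc ht
        simp only [List.nil_append] at h
        rw [h]
        simp [PySem.Chars.split₀.go, hcur]
      · rw [if_neg hcur]
        have h := ihw [] (cur.reverse :: acc) ht
        simp only [List.nil_append] at h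
        rw [h]
        simp [PySem.Chars.split₀.go, hcur]
  | cons c t ih =>
    intro ws cur acc hws
    simp only [List.cons_append, PySem.Chars.split₀.go]
    by_cases hc : PySem.Chars.isspace c = true <;> by_cases hcur : cur.isEmpty <;>
      simp [hc, hcur, ih _ _ _ hws]

theorem pv_split_strip (s : List Char) :
    PySem.Chars.split₀ (PySem.Chars.strip s) = PySem.Chars.split₀ s := by
  unfold PySem.Chars.split₀ PySem.Chars.strip PySem.Chars.rstrip PySem.Chars.lstrip
  have hdecomp : s.dropWhile PySem.Chars.isspace
      = ((s.dropWhile PySem.Chars.isspace).reverse.dropWhile PySem.Chars.isspace).reverse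
        ++ ((s.dropWhile PySem.Chars.isspace).reverse.takeWhile PySem.Chars.isspace).reverse := by
    rw [← List.reverse_append, List.takeWhile_append_dropWhile, List.reverse_reverse]
  rw [← pv_split_go_lstrip s, hdecomp,
    pv_split_go_rstrip _ _ [] [] (by intro c hc; exact List.mem_takeWhile_imp (by simpa using hc)),
    ← hdecomp]

-- the expanded string splits exactly as B's scan splits
theorem pv_main :
    ∀ (cs cur : List Char) (acc : List (List Char)),
      PySem.Chars.split₀.go (cs.flatMap pvExpand) cur acc = pvBgo cs cur acc := by
  intro cs
  induction cs with
  | nil => intro cur acc; rfl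
  | cons c t ih =>
    intro cur acc
    by_cases h1 : c = '1'
    · subst h1
      simp only [List.flatMap_cons, pvExpand, List.cons_append, beq_self_eq_true,
        reduceIte, List.singleton_append]
      simp only [PySem.Chars.split₀.go, show PySem.Chars.isspace ' ' = true from rfl,
        show PySem.Chars.isspace '1' = false from rfl, Bool.false_eq_true, if_false, if_pos]
      simp only [pvBgo, show PySem.Chars.isspace '1' = false from rfl, Bool.false_eq_true,
        if_false, beq_self_eq_true, Bool.true_or, Bool.true_and]
      by_cases hcur : cur.isEmpty
      · have hc0 : cur = [] := List.isEmpty_iff.mp hcur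
        subst hc0
        simp only [hcur, if_pos, List.isEmpty_nil, Bool.not_true, Bool.false_eq_true, if_false]
        exact ih ['1'] acc
      · simp only [hcur, Bool.false_eq_true, if_false, Bool.not_false, if_pos]
        exact ih ['1'] (cur.reverse :: acc)
    · by_cases h5 : c = '5'
      · subst h5
        simp only [List.flatMap_cons, pvExpand, List.cons_append, beq_self_eq_true, reduceIte,
          show (('5' : Char) == '1') = false from rfl, Bool.false_eq_true, if_false,
          List.singleton_append]
        simp only [PySem.Chars.split₀.go, show PySem.Chars.isspace ' ' = true from rfl,
          show PySem.Chars.isspace '5' = false from rfl, Bool.false_eq_true, if_false, if_pos]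
        simp only [pvBgo, show PySem.Chars.isspace '5' = false from rfl, Bool.false_eq_true,
          if_false, beq_self_eq_true, Bool.or_true, Bool.true_and]
        by_cases hcur : cur.isEmpty
        · have hc0 : cur = [] := List.isEmpty_iff.mp hcur
          subst hc0
          simp only [hcur, if_pos, List.isEmpty_nil, Bool.not_true, Bool.false_eq_true,
            if_false]
          exact ih ['5'] acc
        · simp only [hcur, Bool.false_eq_true, if_false, Bool.not_false, if_pos]
          exact ih ['5'] (cur.reverse :: acc)
      · have hexp : pvExpand c = [c] := by simp [pvExpand, h1, h5]
        have hb1 : (c == '1') = false := by simp [h1]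
        have hb5 : (c == '5') = false := by simp [h5]
        simp only [List.flatMap_cons, hexp, List.singleton_append, PySem.Chars.split₀.go,
          pvBgo, hb1, hb5, Bool.or_self, Bool.false_and, Bool.false_eq_true, if_false]
        by_cases hc : PySem.Chars.isspace c = true <;>
          by_cases hcur : cur.isEmpty <;> simp [hc, hcur, ih]

-- accumulator independence for pvBgo
theorem pv_bgo_acc :
    ∀ (cs cur : List Char) (acc : List (List Char)),
      pvBgo cs cur acc = acc.reverse ++ pvBgo cs cur [] := by
  intro cs
  induction cs with
  | nil => intro cur acc; by_cases hcur : cur.isEmpty <;> simp [pvBgo, hcur]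
  | cons c t ih =>
    intro cur acc
    simp only [pvBgo]
    by_cases hc : PySem.Chars.isspace c = true
    · by_cases hcur : cur.isEmpty
      · simp only [hc, hcur, if_pos]
        exact ih [] acc
      · simp only [hc, if_pos, hcur, Bool.false_eq_true, if_false]
        rw [ih [] (cur.reverse :: acc), ih [] [cur.reverse]]
        simp
    · by_cases hfl : ((c == '1' || c == '5') && !cur.isEmpty) = true
      · simp only [hc, Bool.false_eq_true, if_false, hfl, if_pos]
        rw [ih [c] (cur.reverse :: acc), ih [c] [cur.reverse]]
        simp
      · simp only [hc, Bool.false_eq_true, if_false, hfl]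
        exact ih (c :: cur) acc

-- B's fold computes the int list of pvBgo's tokens
theorem pv_bfold :
    ∀ (cs tok : List Char) (ws : List Int),
      (let st := cs.foldl
        (fun (s : List Int × List Char) ch =>
          if PySem.Chars.isspace ch then
            if s.2.isEmpty then s else (s.1 ++ [pvConv s.2], [])
          else
            let s := if (ch == '1' || ch == '5') && !s.2.isEmpty
                     then (s.1 ++ [pvConv s.2], ([] : List Char)) else s
            (s.1, s.2 ++ [ch]))
        (ws, tok)
       if st.2.isEmpty then st.1 else st.1 ++ [pvConv st.2])
        = ws ++ (pvBgo cs tok.reverse []).map pvConv := by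
  intro cs
  induction cs with
  | nil =>
    intro tok ws
    by_cases htok : tok.isEmpty
    · simp [pvBgo, htok, List.isEmpty_iff.mp htok]
    · simp only [List.foldl_nil, htok, Bool.false_eq_true, if_false, pvBgo,
        List.isEmpty_reverse, List.reverse_reverse, List.map_cons, List.map_nil,
        List.reverse_cons, List.reverse_nil, List.nil_append]
  | cons c t ih =>
    intro tok ws
    simp only [List.foldl_cons]
    by_cases hc : PySem.Chars.isspace c = true
    · by_cases htok : tok.isEmpty
      · simp only [hc, if_pos, htok]
        rw [ih]
        simp [pvBgo, hc, List.isEmpty_iff.mp htok]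
      · simp only [hc, if_pos, htok, Bool.false_eq_true, if_false]
        rw [ih]
        simp only [pvBgo, hc, if_pos, List.isEmpty_reverse, htok, Bool.false_eq_true, if_false]
        rw [pv_bgo_acc _ _ [tok.reverse.reverse]]
        simp
    · by_cases hflush : (c == '1' || c == '5') && !tok.isEmpty
      · simp only [hc, Bool.false_eq_true, if_false, hflush, if_pos]
        rw [ih]
        simp only [pvBgo, hc, Bool.false_eq_true, if_false, List.isEmpty_reverse,
          List.nil_append]
        rw [if_pos (by simpa using hflush)]
        rw [pv_bgo_acc _ _ [tok.reverse.reverse]]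
        simp
      · simp only [hc, Bool.false_eq_true, if_false, hflush]
        rw [ih]
        simp only [pvBgo, hc, Bool.false_eq_true, if_false]
        rw [if_neg (by simpa using hflush)]
        simp

-- the two ports agree on EVERY string (the fallback pipeline = the scan; the four dict
-- entries hold exactly the fallback's values)
theorem pv_ports_eq (xkcd : String) :
    xkcd_to_list_of_weights xkcd = xkcd_to_list_of_weights_alt xkcd := by
  have halt : xkcd_to_list_of_weights_alt xkcd
      = (pvBgo xkcd.toList [] []).map pvConv := by
    unfold xkcd_to_list_of_weights_alt
    simpa using pv_bfold xkcd.toList [] []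
  have hpipe :
      (PySem.Str.split₀ (PySem.Str.strip
          (PySem.Str.replace (PySem.Str.replace xkcd "1" " 1") "5" " 5"))).map
        (fun x => (PySem.Int.ofStr? x).getD 0)
        = (pvBgo xkcd.toList [] []).map pvConv := by
    have h1 : (PySem.Str.strip (PySem.Str.replace (PySem.Str.replace xkcd "1" " 1")
        "5" " 5")).toList
        = PySem.Chars.strip (PySem.Chars.replace
            (PySem.Chars.replace xkcd.toList ['1'] [' ', '1']) ['5'] [' ', '5']) := by
      simp [PySem.Str.toList_strip, PySem.Str.toList_replace]
    have h2 : PySem.Chars.replace (PySem.Chars.replace xkcd.toList ['1'] [' ', '1'])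
        ['5'] [' ', '5'] = xkcd.toList.flatMap pvExpand := by
      rw [pv_replace_eq_flatMap, pv_replace_eq_flatMap, List.flatMap_assoc]
      apply List.flatMap_congr
      intro c _
      by_cases hc1 : c = '1'
      · subst hc1; rfl
      · by_cases hc5 : c = '5'
        · subst hc5; rfl
        · simp [pvExpand, hc1, hc5]
    calc (PySem.Str.split₀ (PySem.Str.strip (PySem.Str.replace
            (PySem.Str.replace xkcd "1" " 1") "5" " 5"))).map
          (fun x => (PySem.Int.ofStr? x).getD 0)
        = ((PySem.Str.split₀ (PySem.Str.strip (PySem.Str.replace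
            (PySem.Str.replace xkcd "1" " 1") "5" " 5"))).map String.toList).map
          (fun t => (PySem.Int.ofChars? t).getD 0) := by
          simp only [List.map_map]
          rfl
      _ = (pvBgo xkcd.toList [] []).map pvConv := by
          rw [PySem.Str.split₀_map_toList, h1, pv_split_strip, h2, PySem.Chars.split₀,
            pv_main]
          rfl
  unfold xkcd_to_list_of_weights
  by_cases e1 : xkcd = "1101001000"
  · subst e1; rw [halt]; decide
  · by_cases e2 : xkcd = "1000100100010100110"
    · subst e2; rw [halt]; decide
    · by_cases e3 : xkcd = "100010001050015"
      · subst e3; rw [halt]; decide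
      · by_cases e4 : xkcd = "50010010050101015"
        · subst e4; rw [halt]; decide
        · have hcont : (PySem.Dict.ofList
              [("1101001000", ([1, 10, 100, 1000] : List Int)),
               ("1000100100010100110", [1000, 100, 1000, 10, 100, 1, 10]),
               ("100010001050015", [1000, 1000, 10, 500, 1, 5]),
               ("50010010050101015", [500, 100, 100, 50, 10, 10, 1, 5])]).contains xkcd
              = false := by
            rw [PySem.Dict.contains_eq_decide_mem_keys]
            simp only [decide_eq_false_iff_not]
            intro hmem
            have hkeys : (PySem.Dict.ofList
                [("1101001000", ([1, 10, 100, 1000] : List Int)),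
                 ("1000100100010100110", [1000, 100, 1000, 10, 100, 1, 10]),
                 ("100010001050015", [1000, 1000, 10, 500, 1, 5]),
                 ("50010010050101015", [500, 100, 100, 50, 10, 10, 1, 5])]).keys
                = ["1101001000", "1000100100010100110", "100010001050015",
                   "50010010050101015"] := by decide
            rw [hkeys] at hmem
            simp only [List.mem_cons, List.not_mem_nil, or_false] at hmem
            rcases hmem with h | h | h | h <;> simp_all
          simp only [hcont, Bool.false_eq_true, if_false]
          rw [hpipe, halt]

-- ===== VERDICT (by name: the statement is the Claim_ definition above) =====
theorem xkcd_to_list_of_weights_spec : Claim_equal_xkcd_to_list_of_weights := by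
  intro xkcd _ _
  unfold Spec_xkcd_to_list_of_weights
  exact pv_ports_eq xkcd
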